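-- pv_equiv track=rewrite | github.com/Promaia/promaia-py | promaia/cli/schedule_grid_selector.py | schedule_to_string
-- ===== SOURCE A (Python) =====
-- from typing import List, Tuple, Optional, Set
--
-- DAYS_OF_WEEK = ["Mon", "Tue", "Wed", "Thu", "Fri", "Sat", "Sun"]
--
-- def schedule_to_string(schedule: List[Tuple[str, str]]) -> str:
--     """
--     Convert schedule to a readable string.
--
--     Args:
--         schedule: List of (day, time) tuples
--
--     Returns:
--         Human-readable schedule string
--     """
--     if not schedule:
--         return "No schedule"
--
--     # Group by day
--     by_day = {}
--     for day, time in schedule: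
--         if day not in by_day:
--             by_day[day] = []
--         by_day[day].append(time)
--
--     # Sort times within each day
--     for day in by_day:
--         by_day[day].sort()
--
--     # Format
--     parts = []
--     for day in DAYS_OF_WEEK:
--         if day in by_day:
--             times = ", ".join(by_day[day])
--             parts.append(f"{day}: {times}")
--
--     return " | ".join(parts)
-- ===== SOURCE B (Python) =====
-- DAYS_OF_WEEK = ["Mon", "Tue", "Wed", "Thu", "Fri", "Sat", "Sun"]
--
-- def schedule_to_string(schedule):
--     if not schedule:
--         return "No schedule"
--     parts = []
--     for day in DAYS_OF_WEEK:
--         times = sorted(t for d, t in schedule if d == day)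
--         if times:
--             parts.append(f"{day}: {', '.join(times)}")
--     return " | ".join(parts)
-- ===== Notes on version B (the rewrite author's own statement) =====
-- stated objective: simpler
-- what changed: Replaces the grouping dict plus a separate per-key sorting pass and a membership-tested formatting loop with a single loop over DAYS_OF_WEEK that filters and sorts the schedule per weekday, appending only non-empty days.
import Mathlib
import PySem

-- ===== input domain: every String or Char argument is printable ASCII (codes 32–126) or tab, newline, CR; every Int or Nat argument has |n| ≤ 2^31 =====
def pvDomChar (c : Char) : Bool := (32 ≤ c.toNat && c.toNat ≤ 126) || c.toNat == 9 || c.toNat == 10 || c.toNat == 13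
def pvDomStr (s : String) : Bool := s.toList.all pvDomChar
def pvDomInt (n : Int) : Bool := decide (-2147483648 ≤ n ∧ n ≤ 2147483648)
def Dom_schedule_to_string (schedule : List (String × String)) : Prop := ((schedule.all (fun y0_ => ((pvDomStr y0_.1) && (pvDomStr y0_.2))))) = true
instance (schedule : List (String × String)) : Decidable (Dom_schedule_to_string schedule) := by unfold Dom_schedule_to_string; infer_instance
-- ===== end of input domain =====

-- B replaces A's grouping dict + per-key sorting pass + membership-tested formatting loop with one
-- loop over DAYS_OF_WEEK that filters and sorts the schedule per weekday (objective: simpler).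

def pvDaysOfWeek : List String := ["Mon", "Tue", "Wed", "Thu", "Fri", "Sat", "Sun"]

-- ===== PORT A =====
def schedule_to_string (schedule : List (String × String)) : String :=
  if schedule.isEmpty then "No schedule" else
  -- group by day: "if day not in by_day: by_day[day] = []" followed by "by_day[day].append(time)"
  -- is exactly by_day[day] = by_day.get(day, []) + [time], i.e. Dict.modify with default []
  let by_day : PySem.Dict String (List String) :=
    schedule.foldl (fun d p => d.modify p.1 [] (fun ts => ts ++ [p.2])) PySem.Dict.empty
  -- "for day in by_day: by_day[day].sort()" — in-place sort of each day's list of times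
  let by_day2 : PySem.Dict String (List String) :=
    by_day.keys.foldl (fun d day => d.modify day [] (fun ts => PySem.List.sorted ts (fun t => t) false)) by_day
  let parts : List String :=
    pvDaysOfWeek.foldl (fun parts day =>
      if by_day2.contains day then
        parts ++ [day ++ ": " ++ PySem.Str.join ", " (by_day2.getD day [])]
      else parts) []
  PySem.Str.join " | " parts

-- ===== PORT B =====
def schedule_to_string_alt (schedule : List (String × String)) : String :=
  if schedule.isEmpty then "No schedule" else
  let parts : List String :=
    pvDaysOfWeek.foldl (fun parts day =>
      let times := PySem.List.sorted ((schedule.filter (fun p => p.1 == day)).map (fun p => p.2)) (fun t => t) false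
      if times.isEmpty then parts
      else parts ++ [day ++ ": " ++ PySem.Str.join ", " times]) []
  PySem.Str.join " | " parts

-- ===== PRECONDITION & SPEC =====
def Spec_schedule_to_string (schedule : List (String × String)) (out : String) : Prop := out = schedule_to_string_alt schedule
instance (schedule : List (String × String)) (out : String) : Decidable (Spec_schedule_to_string schedule out) := by unfold Spec_schedule_to_string; infer_instance

-- ===== CLAIM (what is proved, stated in full; the proofs are below) =====
def Claim_equal_schedule_to_string : Prop := ∀ (schedule : List (String × String)), Dom_schedule_to_string schedule → Spec_schedule_to_string schedule (schedule_to_string schedule)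

-- ===== LEMMAS AND PROOFS =====

-- getD after A's per-key sorting fold: sort the value at keys in ks (ks nodup), leave others
theorem pv_getD_sortfold (ks : List String) (d : PySem.Dict String (List String)) (c : String)
    (hnd : ks.Nodup) :
    (ks.foldl (fun d day => d.modify day [] (fun ts => PySem.List.sorted ts (fun t => t) false)) d).getD c []
      = if c ∈ ks then PySem.List.sorted (d.getD c []) (fun t => t) false else d.getD c [] := by
  induction ks generalizing d with
  | nil => simp
  | cons k ks ih =>
    simp only [List.foldl_cons]
    rw [ih _ (List.Nodup.of_cons hnd)]
    by_cases hc : c = k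
    · subst hc
      have hcn : c ∉ ks := (List.nodup_cons.mp hnd).1
      simp [hcn]
    · simp [PySem.Dict.getD_modify, hc, List.mem_cons]

-- contains after the sorting fold
theorem pv_contains_sortfold (ks : List String) (d : PySem.Dict String (List String)) (c : String) :
    (ks.foldl (fun d day => d.modify day [] (fun ts => PySem.List.sorted ts (fun t => t) false)) d).contains c
      = (decide (c ∈ ks) || d.contains c) := by
  induction ks generalizing d with
  | nil => simp
  | cons k ks ih =>
    simp only [List.foldl_cons]
    rw [ih]
    by_cases hc : c = k
    · simp [PySem.Dict.contains_modify, hc, List.mem_cons]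
    · have hb : (c == k) = false := beq_eq_false_iff_ne.mpr hc
      simp [PySem.Dict.contains_modify, hb, hc, List.mem_cons]

theorem schedule_to_string_eq_alt (schedule : List (String × String)) :
    schedule_to_string schedule = schedule_to_string_alt schedule := by
  unfold schedule_to_string schedule_to_string_alt
  by_cases hemp : schedule.isEmpty
  · simp [hemp]
  · simp only [hemp, if_neg, Bool.false_eq_true, not_false_eq_true]
    set by_day : PySem.Dict String (List String) :=
      schedule.foldl (fun d p => d.modify p.1 [] (fun ts => ts ++ [p.2])) PySem.Dict.empty with hby
    have hnd : by_day.keys.Nodup := by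
      rw [hby]
      exact PySem.Dict.nodup_keys_foldl_modify_key schedule Prod.fst []
        (fun _ p => fun ts => ts ++ [p.2]) PySem.Dict.empty (by simp)
    have hkeys : ∀ c, c ∈ by_day.keys ↔ c ∈ schedule.map Prod.fst := by
      intro c
      rw [hby, PySem.Dict.keys_foldl_modify_key schedule Prod.fst []
        (fun _ p => fun ts => ts ++ [p.2]) PySem.Dict.empty]
      simp [PySem.Set.mem_update]
    have hgetD : ∀ c, by_day.getD c [] = (schedule.filter (fun p => p.1 == c)).map (fun p => p.2) := by
      intro c
      rw [hby, PySem.Dict.getD_foldl_modify_append]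
      simp
    congr 1
    apply PySem.List.foldl_congr_mem
    intro acc day _
    have hfil : ((schedule.filter (fun p => p.1 == day)).map (fun p => p.2) = [])
        ↔ day ∉ schedule.map Prod.fst := by
      rw [List.map_eq_nil_iff, List.filter_eq_nil_iff]
      constructor
      · intro h hm
        obtain ⟨p, hp, hpd⟩ := List.mem_map.mp hm
        exact absurd (beq_iff_eq.mpr hpd) (by simpa using h p hp)
      · intro h p hp
        simp only [beq_iff_eq]
        exact fun hpd => h (List.mem_map.mpr ⟨p, hp, hpd⟩)
    rw [pv_contains_sortfold, pv_getD_sortfold _ _ _ hnd]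
    by_cases hmem : day ∈ schedule.map Prod.fst
    · have hk : day ∈ by_day.keys := (hkeys day).mpr hmem
      have hne : ¬ ((schedule.filter (fun p => p.1 == day)).map (fun p => p.2) = []) := by
        rw [hfil]; exact not_not_intro hmem
      simp only [hk, decide_true, Bool.true_or, if_true, hgetD]
      have : ¬ (PySem.List.sorted ((schedule.filter (fun p => p.1 == day)).map (fun p => p.2)) (fun t => t) false).isEmpty := by
        rw [List.isEmpty_iff, PySem.List.sorted_eq_nil_iff]
        exact hne
      simp [this]
    · have hk : day ∉ by_day.keys := fun h => hmem ((hkeys day).mp h)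
      have hnc : by_day.contains day = false := by
        cases h : by_day.contains day with
        | false => rfl
        | true => exact absurd ((PySem.Dict.contains_iff_mem_keys _ _).mp h) hk
      have hfe : (schedule.filter (fun p => p.1 == day)).map (fun p => p.2) = [] := hfil.mpr hmem
      simp [hk, hnc, hfe, PySem.List.sorted_eq_nil_iff]

-- ===== VERDICT (by name: the statement is the Claim_ definition above) =====
theorem schedule_to_string_spec : Claim_equal_schedule_to_string := by
  intro schedule _
  unfold Spec_schedule_to_string
  exact schedule_to_string_eq_alt schedule
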